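-- pv_equiv track=rewrite | github.com/mklug/RandomTree | dyck.py | dyck_rotate
-- ===== SOURCE A (Python) =====
-- from collections import deque
--
-- def dyck_rotate(w: list[str]) -> list[str]:
--     '''Rotates word to an x-augmented Dyck path.
--     '''
--     if w.count('x') - 1 != w.count('y'):
--         raise ValueError('Input must have one more x than y.')
--
--     N = len(w)
--     dq = deque(w)
--
--     height = 0
--     w_index = 0
--     dq_index = 0
--
--     while dq_index != N:
--         if w[w_index] == 'x':
--             height += 1
--         elif w[w_index] == 'y':
--             height -= 1
--         w_index += 1
--         w_index %= N
--         dq_index += 1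
--         if height < 1:
--             # Reset.
--             for _ in range(dq_index):
--                 dq.append(dq.popleft())
--             dq_index = 0
--             height = 0
--     return list(dq)
-- ===== SOURCE B (Python) =====
-- def dyck_rotate(w: list[str]) -> list[str]:
--     '''Rotates word to an x-augmented Dyck path.
--     '''
--     if w.count('x') - 1 != w.count('y'):
--         raise ValueError('Input must have one more x than y.')
--     # One pass: running height h after each prefix; m = end of the LAST prefix
--     # attaining the minimum height (0 if the empty prefix is the unique minimum).
--     # The valid rotation starts right after that last minimum.
--     h = 0
--     best = 0
--     m = 0
--     i = 0
--     for c in w: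
--         i += 1
--         h += (1 if c == 'x' else 0) - (1 if c == 'y' else 0)
--         if h <= best:
--             best = h
--             m = i
--     return w[m:] + w[:m]
-- ===== Notes on version B (the rewrite author's own statement) =====
-- stated objective: simpler
-- what changed: Replaced A's deque with rotate-and-reset rescanning loop by the cycle lemma in closed form: one pass computes prefix heights and the last index attaining the minimum height, and the answer is a single slice rotation starting right after it.
import Mathlib
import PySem

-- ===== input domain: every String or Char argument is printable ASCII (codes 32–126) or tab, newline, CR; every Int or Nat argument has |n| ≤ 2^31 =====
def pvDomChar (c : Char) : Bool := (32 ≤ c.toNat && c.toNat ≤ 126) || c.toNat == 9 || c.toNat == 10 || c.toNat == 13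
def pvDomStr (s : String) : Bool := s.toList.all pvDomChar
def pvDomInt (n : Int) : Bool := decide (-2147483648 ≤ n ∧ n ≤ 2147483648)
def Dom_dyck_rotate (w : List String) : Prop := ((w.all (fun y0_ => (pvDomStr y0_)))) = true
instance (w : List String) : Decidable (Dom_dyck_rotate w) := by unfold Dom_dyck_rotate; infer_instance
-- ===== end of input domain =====

-- B replaces A's deque rotate-and-reset loop by the closed-form cycle lemma: one pass finds the
-- last minimum of the prefix heights and the result is a single slice rotation starting after it.


-- ===== PORT A =====
-- dq.append(dq.popleft()), executed k times (the reset's 'for _ in range(dq_index)')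
def pvRotOnce (l : List String) : List String :=
  match l with
  | [] => []
  | a :: t => t ++ [a]

def pvRotK : Nat → List String → List String
  | 0, l => l
  | k + 1, l => pvRotK k (pvRotOnce l)

-- the 'while dq_index != N' loop; fuel only makes the recursion structural (2*N+1 is enough
-- under Pre_, proved below).  w[w_index] is always in range (w_index is kept < N by '%= N'),
-- so getD is exact there.
def pvLoopA (w : List String) : Nat → List String → Int → Nat → Nat → List String
  | 0, dq, _, _, _ => dq
  | fuel + 1, dq, height, w_index, dq_index =>
    if dq_index = w.length then dq
    else
      let height' := if w.getD w_index "" = "x" then height + 1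
                     else if w.getD w_index "" = "y" then height - 1
                     else height
      let w_index' := (w_index + 1) % w.length
      if height' < 1 then pvLoopA w fuel (pvRotK (dq_index + 1) dq) 0 w_index' 0
      else pvLoopA w fuel dq height' w_index' (dq_index + 1)

def dyck_rotate (w : List String) : List String :=
  if ((PySem.List.count w "x" : Int) - 1) ≠ (PySem.List.count w "y" : Int) then []
    -- Python raises ValueError here; excluded by Pre_
  else pvLoopA w (2 * w.length + 1) w 0 0 0

-- ===== PORT B =====
-- state (i, h, best, m) of the single pass
def pvScanStep (st : Int × Int × Int × Int) (c : String) : Int × Int × Int × Int :=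
  let i := st.1 + 1
  let h := st.2.1 + (if c = "x" then 1 else 0) - (if c = "y" then 1 else 0)
  if h ≤ st.2.2.1 then (i, h, h, i) else (i, h, st.2.2.1, st.2.2.2)

def dyck_rotate_alt (w : List String) : List String :=
  if ((PySem.List.count w "x" : Int) - 1) ≠ (PySem.List.count w "y" : Int) then []
    -- Python raises ValueError here; excluded by Pre_
  else
    let st := w.foldl pvScanStep (0, 0, 0, 0)
    PySem.List.slice w (some st.2.2.2) none ++ PySem.List.slice w none (some st.2.2.2)

-- ===== PRECONDITION & SPEC =====
-- exactly the inputs where A's guard does not raise ValueError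
def Pre_dyck_rotate (w : List String) : Prop :=
  ((PySem.List.count w "x" : Int) - 1) = (PySem.List.count w "y" : Int)
instance (w : List String) : Decidable (Pre_dyck_rotate w) := by
  unfold Pre_dyck_rotate; infer_instance

def pvWitness_dyck_rotate : List String := ["y", "x", "x"]

def Spec_dyck_rotate (w : List String) (out : List String) : Prop := out = dyck_rotate_alt w
instance (w : List String) (out : List String) : Decidable (Spec_dyck_rotate w out) := by
  unfold Spec_dyck_rotate; infer_instance

-- ===== CLAIM (what is proved, stated in full; the proofs are below) =====
def Claim_equal_dyck_rotate : Prop :=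
  ∀ (w : List String), Dom_dyck_rotate w → Pre_dyck_rotate w →
    Spec_dyck_rotate w (dyck_rotate w)

-- ===== LEMMAS AND PROOFS =====

-- the height contribution of one letter
def pvStep (c : String) : Int := (if c = "x" then 1 else 0) - (if c = "y" then 1 else 0)

-- prefix heights of the cyclic extension of w
def pvS (w : List String) : Nat → Int
  | 0 => 0
  | i + 1 => pvS w i + pvStep (w.getD (i % w.length) "")

lemma pvStepA_eq (h : Int) (c : String) :
    (if c = "x" then h + 1 else if c = "y" then h - 1 else h) = h + pvStep c := by
  unfold pvStep; split_ifs <;> simp_all; omega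

lemma pvRotK_eq (k : Nat) : ∀ l : List String, k ≤ l.length →
    pvRotK k l = l.drop k ++ l.take k := by
  induction k with
  | zero => simp [pvRotK]
  | succ k ih =>
    intro l hl
    cases l with
    | nil => simp at hl
    | cons a t =>
      simp at hl
      rw [pvRotK, pvRotOnce, ih (t ++ [a]) (by simp; omega)]
      rw [List.drop_append_of_le_length (by omega), List.take_append_of_le_length (by omega)]
      simp

lemma pvRotK_rot (w : List String) (r d : Nat) (h : r + d ≤ w.length) :
    pvRotK d (w.drop r ++ w.take r) = w.drop (r + d) ++ w.take (r + d) := by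
  rw [pvRotK_eq d _ (by simp; omega)]
  rw [List.drop_append_of_le_length (by simp; omega), List.take_append_of_le_length (by simp; omega)]
  rw [List.drop_drop, List.append_assoc, ← List.take_add]

lemma pvS_add_len (w : List String) (i : Nat) :
    pvS w (i + w.length) = pvS w i + pvS w w.length := by
  induction i with
  | zero => simp [pvS]
  | succ i ih =>
    have h1 : i + 1 + w.length = (i + w.length) + 1 := by omega
    rw [h1, pvS, Nat.add_mod_right, ih, pvS]
    ring

lemma pvS_take (w : List String) : ∀ k, k ≤ w.length →
    pvS w k = ((w.take k).map pvStep).sum := by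
  intro k
  induction k with
  | zero => simp [pvS]
  | succ k ih =>
    intro hk
    have hlt : k < w.length := by omega
    rw [pvS, ih (by omega), List.map_take, List.map_take, List.sum_take_succ _ k (by simp [hlt])]
    simp [Nat.mod_eq_of_lt hlt, List.getD_eq_getElem?_getD, List.getElem?_eq_getElem hlt]

lemma pvS_len_eq (w : List String) :
    pvS w w.length = (PySem.List.count w "x" : Int) - (PySem.List.count w "y" : Int) := by
  rw [pvS_take w w.length (le_refl _), List.take_length, PySem.List.count_eq, PySem.List.count_eq]
  induction w with
  | nil => simp
  | cons c t ih =>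
    simp [List.count_cons, pvStep, ih]
    split_ifs <;> simp_all <;> omega

lemma pvAdvance (w : List String) (r : Nat) :
    ∀ (c : Nat), ∀ (di f : Nat) (dq : List String),
      di + c ≤ w.length →
      (∀ e, di < e → e ≤ di + c → 1 ≤ pvS w (r + e) - pvS w r) →
      pvLoopA w (c + f) dq (pvS w (r + di) - pvS w r) ((r + di) % w.length) di
        = pvLoopA w f dq (pvS w (r + di + c) - pvS w r) ((r + di + c) % w.length) (di + c) := by
  intro c
  induction c with
  | zero => intro di f dq _ _; simp
  | succ c ih =>
    intro di f dq hle hht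
    have hN : ¬ (di = w.length) := by omega
    have hf : c + 1 + f = (c + f) + 1 := by omega
    rw [hf, pvLoopA, if_neg hN]
    have hstep : (if w.getD ((r + di) % w.length) "" = "x" then (pvS w (r + di) - pvS w r) + 1
        else if w.getD ((r + di) % w.length) "" = "y" then (pvS w (r + di) - pvS w r) - 1
        else (pvS w (r + di) - pvS w r)) = pvS w (r + di + 1) - pvS w r := by
      rw [pvStepA_eq, pvS]; ring
    simp only [hstep, Nat.mod_add_mod]
    have hpos := hht (di + 1) (by omega) (by omega)
    rw [show r + (di + 1) = r + di + 1 from by omega] at hpos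
    rw [if_neg (by omega)]
    have h1 : r + di + 1 = r + (di + 1) := by omega
    have h2 : r + di + (c + 1) = r + (di + 1) + c := by omega
    have h3 : di + (c + 1) = (di + 1) + c := by omega
    rw [h1, h2, h3]
    exact ih (di + 1) f dq (by omega) (fun e he1 he2 => hht e (by omega) (by omega))

lemma pvReach (w : List String) (s : Nat) (hT : pvS w w.length = 1) (hsN : s < w.length)
    (P1 : ∀ j, j ≤ w.length → pvS w s ≤ pvS w j)
    (P2 : ∀ j, s < j → j ≤ w.length → pvS w s < pvS w j) :
    ∀ (k r f : Nat), s - r = k → r ≤ s →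
      (∀ j, j ≤ r → pvS w r ≤ pvS w j) →
      pvLoopA w ((s - r) + (w.length + f + 1)) (w.drop r ++ w.take r) 0 r 0
        = w.drop s ++ w.take s := by
  intro k
  induction k using Nat.strong_induction_on with
  | _ k ih =>
    intro r f hk hrs hinv
    by_cases hreq : r = s
    · subst hreq
      have hclean : ∀ e, 0 < e → e ≤ 0 + w.length → 1 ≤ pvS w (r + e) - pvS w r := by
        intro e he0 heN
        by_cases hle : r + e ≤ w.length
        · have := P2 (r + e) (by omega) hle; omega
        · have hj : r + e = (r + e - w.length) + w.length := by omega
          rw [hj, pvS_add_len, hT]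
          have := P1 (r + e - w.length) (by omega); omega
      have hadv := pvAdvance w r w.length 0 (f + 1) (w.drop r ++ w.take r) (by omega) hclean
      simp only [Nat.add_zero, Nat.zero_add, sub_self, Nat.mod_eq_of_lt hsN] at hadv
      rw [show (r - r) + (w.length + f + 1) = w.length + (f + 1) from by omega, hadv,
        pvLoopA, if_pos rfl]
    · have hrs' : r < s := lt_of_le_of_ne hrs hreq
      have hrN : r < w.length := by omega
      have hex : ∃ p, r < p ∧ pvS w p ≤ pvS w r :=
        ⟨s, hrs', P1 r (by omega)⟩
      obtain ⟨hrq, hqle⟩ := Nat.find_spec hex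
      have hqs : Nat.find hex ≤ s := Nat.find_min' hex ⟨hrs', P1 r (by omega)⟩
      set q := Nat.find hex with hqdef
      have hmin : ∀ j, j < q → ¬(r < j ∧ pvS w j ≤ pvS w r) := fun j hj => Nat.find_min hex hj
      have hqN : q < w.length := by omega
      have hht : ∀ e, 0 < e → e ≤ 0 + (q - r - 1) → 1 ≤ pvS w (r + e) - pvS w r := by
        intro e he0 hec
        have := hmin (r + e) (by omega)
        have : ¬ (pvS w (r + e) ≤ pvS w r) := by
          intro hc; exact this ⟨by omega, hc⟩
        omega
      have hadv := pvAdvance w r (q - r - 1) 0 ((s - q) + (w.length + f + 1) + 1)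
        (w.drop r ++ w.take r) (by omega) hht
      simp only [Nat.add_zero, Nat.zero_add, sub_self, Nat.mod_eq_of_lt hrN] at hadv
      rw [show (s - r) + (w.length + f + 1)
            = (q - r - 1) + ((s - q) + (w.length + f + 1) + 1) from by omega, hadv]
      have hq1 : r + (q - r - 1) = q - 1 := by omega
      rw [hq1, show (s - q) + (w.length + f + 1) + 1 = ((s - q) + (w.length + f + 1)) + 1 from rfl,
        pvLoopA, if_neg (show ¬ (q - r - 1 = w.length) from by omega)]
      have hSq : pvS w q = pvS w (q - 1) + pvStep (w.getD ((q - 1) % w.length) "") := by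
        conv_lhs => rw [show q = (q - 1) + 1 from by omega]
        rw [pvS]
      have hcond : (if w.getD ((q - 1) % w.length) "" = "x" then (pvS w (q - 1) - pvS w r) + 1
          else if w.getD ((q - 1) % w.length) "" = "y" then (pvS w (q - 1) - pvS w r) - 1
          else (pvS w (q - 1) - pvS w r)) = pvS w q - pvS w r := by
        rw [pvStepA_eq, hSq]; ring
      simp only [hcond]
      rw [if_pos (show pvS w q - pvS w r < 1 from by omega)]
      rw [Nat.mod_add_mod, show (q - 1) + 1 = q from by omega, Nat.mod_eq_of_lt hqN]
      rw [show (q - r - 1) + 1 = q - r from by omega]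
      have hrot := pvRotK_rot w r (q - r) (by omega)
      rw [show r + (q - r) = q from by omega] at hrot
      rw [hrot]
      refine ih (s - q) (by omega) q f rfl (by omega) ?_
      intro j hj
      by_cases hjr : j ≤ r
      · have := hinv j hjr; omega
      · by_cases hjq : j = q
        · subst hjq; omega
        · have h1 := hmin j (by omega)
          have h2 : ¬ (pvS w j ≤ pvS w r) := by intro hc; exact h1 ⟨by omega, hc⟩
          omega

lemma pvScan_inv (w : List String) : ∀ k, k ≤ w.length →
    ∃ mn : Nat, (w.take k).foldl pvScanStep (0, 0, 0, 0)
        = ((k : Int), pvS w k, pvS w mn, (mn : Int)) ∧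
      mn ≤ k ∧ (∀ j, j ≤ k → pvS w mn ≤ pvS w j) ∧
      (∀ j, mn < j → j ≤ k → pvS w mn < pvS w j) := by
  intro k
  induction k with
  | zero =>
    intro _
    refine ⟨0, by simp [pvS], Nat.le_refl 0, ?_, ?_⟩
    · intro j hj; interval_cases j; exact le_refl _
    · intro j h1 h2; omega
  | succ k ih =>
    intro hk1
    obtain ⟨mn, hst, hmle, hA, hB⟩ := ih (by omega)
    have hklt : k < w.length := by omega
    rw [List.take_add_one, List.getElem?_eq_getElem hklt]
    simp only [Option.toList_some, List.foldl_append, List.foldl_cons, List.foldl_nil, hst]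
    have hS1 : pvS w (k + 1) = pvS w k + pvStep (w.getD (k % w.length) "") := by rw [pvS]
    have hgd : w.getD (k % w.length) "" = w[k] := by
      rw [Nat.mod_eq_of_lt hklt, List.getD_eq_getElem?_getD, List.getElem?_eq_getElem hklt]
      rfl
    have hh : pvS w k + (if w[k] = "x" then (1:Int) else 0) - (if w[k] = "y" then (1:Int) else 0)
        = pvS w (k + 1) := by
      rw [hS1, hgd, pvStep]; ring
    rw [pvScanStep]
    simp only [hh]
    by_cases hle : pvS w (k + 1) ≤ pvS w mn
    · rw [if_pos hle]
      refine ⟨k + 1, by push_cast; rfl, le_refl _, ?_, ?_⟩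
      · intro j hj
        by_cases hjk : j = k + 1
        · subst hjk; exact le_refl _
        · have := hA j (by omega); omega
      · intro j h1 h2; omega
    · rw [if_neg hle]
      refine ⟨mn, by push_cast; rfl, by omega, ?_, ?_⟩
      · intro j hj
        by_cases hjk : j = k + 1
        · subst hjk; omega
        · exact hA j (by omega)
      · intro j h1 h2
        by_cases hjk : j = k + 1
        · subst hjk; omega
        · exact hB j h1 (by omega)

-- ===== VERDICT (by name: the statement is the Claim_ definition above) =====
theorem dyck_rotate_spec : Claim_equal_dyck_rotate := by
  intro w _ hpre
  unfold Spec_dyck_rotate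
  unfold Pre_dyck_rotate at hpre
  have hT : pvS w w.length = 1 := by rw [pvS_len_eq]; omega
  have hN0 : 0 < w.length := by
    rcases w with _ | ⟨a, t⟩
    · simp [PySem.List.count_eq] at hpre
    · simp
  obtain ⟨mn, hst, hmle, hP1, hP2⟩ := pvScan_inv w w.length (le_refl _)
  rw [List.take_length] at hst
  have hS0 : pvS w 0 = 0 := rfl
  have hmnN : mn < w.length := by
    by_cases h : mn = w.length
    · have := hP1 0 (by omega); rw [hS0] at this; rw [h, hT] at this; omega
    · omega
  rw [dyck_rotate, dyck_rotate_alt, if_neg (not_not_intro hpre), if_neg (not_not_intro hpre)]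
  have hreach := pvReach w mn hT hmnN hP1 hP2 mn 0 (w.length - mn) rfl (by omega)
    (by intro j hj; interval_cases j; exact le_refl _)
  simp only [List.drop_zero, List.take_zero, List.append_nil, Nat.sub_zero] at hreach
  rw [show 2 * w.length + 1 = mn + (w.length + (w.length - mn) + 1) from by omega, hreach, hst]
  simp only [PySem.List.slice_from_natCast, PySem.List.slice_to_natCast]
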